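-- pv_equiv track=rewrite | github.com/shubham-ricky/Python-Programming---Beginners | Vowels.py | getVowels
-- ===== SOURCE A (Python) =====
-- def getVowels(text):                              # Part a)
--     text = text.upper()
--     text_len = len(text)
--     new_list =[]
--
--     for x in range(0,text_len):
--         if text[x] =="A" or text[x] =="E" or text[x] =="I" or text[x] =="O" or text[x] =="U":
--             new_list.append(text[x])
--
--     new_list.sort()
--     return (new_list)
-- ===== SOURCE B (Python) =====
-- def getVowels(text):                              # counting over the fixed 5-vowel alphabet
--     t = text.upper()
--     return [v for v in "AEIOU" for _ in range(t.count(v))]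
-- ===== Notes on version B (the rewrite author's own statement) =====
-- stated objective: faster
-- what changed: B replaces A's per-character index loop plus comparison sort by a counting pass over the fixed 5-vowel alphabet: count each vowel in the uppercased text once and emit the vowels in alphabetical order, so no sort is performed.
import Mathlib
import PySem

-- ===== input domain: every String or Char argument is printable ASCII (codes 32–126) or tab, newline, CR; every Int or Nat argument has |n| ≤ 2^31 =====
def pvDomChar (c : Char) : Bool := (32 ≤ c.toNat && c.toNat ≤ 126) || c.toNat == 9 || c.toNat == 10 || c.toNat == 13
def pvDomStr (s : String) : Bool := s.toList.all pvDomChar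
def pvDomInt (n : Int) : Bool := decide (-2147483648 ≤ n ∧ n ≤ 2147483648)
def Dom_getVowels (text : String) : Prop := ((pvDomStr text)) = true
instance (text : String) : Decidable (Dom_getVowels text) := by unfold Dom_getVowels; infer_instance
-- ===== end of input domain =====

-- B replaces A's collect-then-comparison-sort by a counting pass over the fixed 5-vowel alphabet (objective: faster).

-- ===== PORT A =====
-- A: uppercase the text, scan indices 0..len-1, append each vowel character, then sort the list.
def getVowels (text : String) : List String :=
  let t := PySem.Chars.upper text.toList
  let newList := (PySem.List.pyRange 0 (t.length : Int) 1).foldl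
    (fun acc x =>
      if (PySem.List.pyGetD t x ' ' == 'A' || PySem.List.pyGetD t x ' ' == 'E' ||
          PySem.List.pyGetD t x ' ' == 'I' || PySem.List.pyGetD t x ' ' == 'O' ||
          PySem.List.pyGetD t x ' ' == 'U')
      then acc ++ [String.ofList [PySem.List.pyGetD t x ' ']] else acc)
    []
  PySem.List.sorted newList (fun s => s) false

-- ===== PORT B =====
-- B: uppercase once, then for each vowel in sorted order emit it count-many times (t.count v ports str.count for a 1-char needle).
def getVowels_alt (text : String) : List String :=
  let t := PySem.Chars.upper text.toList
  ['A', 'E', 'I', 'O', 'U'].flatMap (fun v => List.replicate (t.count v) (String.ofList [v]))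

-- ===== PRECONDITION & SPEC =====
def Spec_getVowels (text : String) (out : List String) : Prop := out = getVowels_alt text
instance (text : String) (out : List String) : Decidable (Spec_getVowels text out) := by unfold Spec_getVowels; infer_instance

-- ===== CLAIM (what is proved, stated in full; the proofs are below) =====
def Claim_equal_getVowels : Prop := ∀ (text : String), Dom_getVowels text → Spec_getVowels text (getVowels text)

-- ===== LEMMAS AND PROOFS =====

-- the vowel test of A's loop and the body of B's counting pass, as proof-side abbreviations
def pvP (c : Char) : Bool := c == 'A' || c == 'E' || c == 'I' || c == 'O' || c == 'U'

def pvB (t : List Char) : List String :=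
  ['A', 'E', 'I', 'O', 'U'].flatMap (fun v => List.replicate (t.count v) (String.ofList [v]))

-- pull an element sitting after one / two / three / four leading blocks to the front
theorem pull2 {α : Type} (a : α) (l1 l2 l3 : List α) :
    (l1 ++ (l2 ++ (a :: l3))).Perm (a :: (l1 ++ (l2 ++ l3))) :=
  (List.Perm.append_left l1 List.perm_middle).trans List.perm_middle

theorem pull3 {α : Type} (a : α) (l1 l2 l3 l4 : List α) :
    (l1 ++ (l2 ++ (l3 ++ (a :: l4)))).Perm (a :: (l1 ++ (l2 ++ (l3 ++ l4)))) :=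
  (List.Perm.append_left l1 (pull2 a l2 l3 l4)).trans List.perm_middle

theorem pull4 {α : Type} (a : α) (l1 l2 l3 l4 l5 : List α) :
    (l1 ++ (l2 ++ (l3 ++ (l4 ++ (a :: l5))))).Perm (a :: (l1 ++ (l2 ++ (l3 ++ (l4 ++ l5))))) :=
  (List.Perm.append_left l1 (pull3 a l2 l3 l4 l5)).trans List.perm_middle

-- B's counted output is a permutation of the vowels A collects (in text order)
theorem pvB_perm (t : List Char) :
    (pvB t).Perm ((t.filter pvP).map (fun c => String.ofList [c])) := by
  induction t with
  | nil => simp [pvB]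
  | cons c t ih =>
    by_cases h : pvP c = true
    · simp only [pvB, List.flatMap_cons, List.flatMap_nil, List.append_nil] at ih ⊢
      simp only [pvP, Bool.or_eq_true, beq_iff_eq] at h
      rw [List.filter_cons_of_pos (by simp [pvP]; tauto), List.map_cons]
      rcases h with (((h|h)|h)|h)|h <;> subst h <;>
        simp only [List.count_cons, beq_iff_eq,
          Char.reduceEq] <;>
        simp only [if_false, add_zero, if_true]
      · exact ih.cons _
      · exact (List.perm_middle).trans (ih.cons _)
      · exact (pull2 _ _ _ _).trans (ih.cons _)
      · exact (pull3 _ _ _ _ _).trans (ih.cons _)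
      · exact (pull4 _ _ _ _ _ _).trans (ih.cons _)
    · simp only [pvP, Bool.or_eq_true, beq_iff_eq] at h
      push Not at h
      obtain ⟨⟨⟨⟨h1, h2⟩, h3⟩, h4⟩, h5⟩ := h
      simp only [pvB, List.flatMap_cons, List.flatMap_nil, List.append_nil] at ih ⊢
      rw [List.count_cons_of_ne h1, List.count_cons_of_ne h2,
          List.count_cons_of_ne h3, List.count_cons_of_ne h4,
          List.count_cons_of_ne h5,
          List.filter_cons_of_neg (by simp [pvP, h1, h2, h3, h4, h5])]
      exact ih
-- B's counted output is non-decreasing in Lean's String order (the order PySem.List.sorted uses)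
theorem pvB_pairwise (t : List Char) : (pvB t).Pairwise (fun a b => a ≤ b) := by
  simp only [pvB, List.flatMap_cons, List.flatMap_nil, List.append_nil, List.pairwise_append,
    List.pairwise_replicate, List.mem_replicate, String.le_iff_toList_le]
  refine ⟨Or.inr le_rfl, ⟨Or.inr le_rfl, ⟨Or.inr le_rfl, ⟨Or.inr le_rfl, Or.inr le_rfl, ?_⟩, ?_⟩, ?_⟩, ?_⟩ <;>
    (rintro a ⟨-, rfl⟩ b hb;
     try simp only [List.mem_append, List.mem_replicate] at hb;
     first
      | (rcases hb with (⟨-,rfl⟩|⟨-,rfl⟩|⟨-,rfl⟩|⟨-,rfl⟩) <;> decide)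
      | (rcases hb with (⟨-,rfl⟩|⟨-,rfl⟩|⟨-,rfl⟩) <;> decide)
      | (rcases hb with (⟨-,rfl⟩|⟨-,rfl⟩) <;> decide)
      | (rcases hb with ⟨-,rfl⟩; decide))

-- ===== VERDICT (by name: the statement is the Claim_ definition above) =====
theorem getVowels_spec : Claim_equal_getVowels := by
  intro text _
  show getVowels text = getVowels_alt text
  unfold getVowels getVowels_alt
  dsimp only
  rw [PySem.List.foldl_pyRange_zero_pyGetD' (PySem.Chars.upper text.toList) ' '
      (fun acc c => if (c == 'A' || c == 'E' || c == 'I' || c == 'O' || c == 'U')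
        then acc ++ [String.ofList [c]] else acc) []]
  rw [PySem.List.foldl_append_if]
  have h := PySem.List.sorted_id_eq_of_perm_of_pairwise _ _
    (pvB_perm (PySem.Chars.upper text.toList)) (pvB_pairwise (PySem.Chars.upper text.toList))
  simpa [pvB, pvP] using h
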